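-- pv_equiv track=rewrite | github.com/igor-elovikov/hipie | scripts/python/imageutils.py | get_vector_volumes
-- ===== SOURCE A (Python) =====
-- def is_vector_name(name):
--     # type: (str) -> bool
--     return name.endswith(".x") or name.endswith(".y") or name.endswith(".z")
--
-- def all_components_exist(name, volume_names):
--     # type: (str, list[str]) -> bool
--     name_x = name + ".x"
--     name_y = name + ".y"
--     name_z = name + ".z"
--     return name_x in volume_names and name_y in volume_names and name_z in volume_names
--
-- def get_vector_volumes(volumes):
--     vector_volumes = []
--
--     for volume in volumes:
--         if is_vector_name(volume):
--             name = volume[:-2]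
--             if name not in vector_volumes and all_components_exist(name, volumes):
--                 vector_volumes.append(name)
--
--     return vector_volumes
-- ===== SOURCE B (Python) =====
-- def get_vector_volumes(volumes):
--     # one grouping pass: base -> set of component suffixes seen; then filter in insertion order
--     groups = {}
--     for volume in volumes:
--         if volume.endswith((".x", ".y", ".z")):
--             base = volume[:-2]
--             comps = groups.get(base, set())
--             comps.add(volume[-2:])
--             groups[base] = comps
--     return [base for base, comps in groups.items()
--             if {".x", ".y", ".z"} <= comps]
-- ===== Notes on version B (the rewrite author's own statement) =====
-- stated objective: faster
-- what changed: Replaces the per-candidate rescans of the whole volume list (three 'in volumes' scans and an 'in result' scan per vector-named volume) with one grouping pass building an ordered dict base -> set of seen suffixes, followed by a filter over the dict in insertion order.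
import Mathlib
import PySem

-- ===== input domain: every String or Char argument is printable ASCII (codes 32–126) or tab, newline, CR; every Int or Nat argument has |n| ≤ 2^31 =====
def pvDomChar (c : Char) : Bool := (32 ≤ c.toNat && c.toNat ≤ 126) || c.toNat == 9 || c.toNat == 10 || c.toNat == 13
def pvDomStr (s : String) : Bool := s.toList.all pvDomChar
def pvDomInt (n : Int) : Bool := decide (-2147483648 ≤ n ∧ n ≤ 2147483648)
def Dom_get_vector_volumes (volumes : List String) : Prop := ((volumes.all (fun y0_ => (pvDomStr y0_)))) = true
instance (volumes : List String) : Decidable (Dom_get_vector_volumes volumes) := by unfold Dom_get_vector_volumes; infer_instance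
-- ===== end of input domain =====

-- B replaces A's per-candidate rescans with one grouping pass (ordered dict base -> suffix set) plus a filter pass.


-- ===== PORT A =====
def is_vector_name (name : String) : Bool :=
  PySem.Str.endswith name ".x" || PySem.Str.endswith name ".y" || PySem.Str.endswith name ".z"

def all_components_exist (name : String) (volume_names : List String) : Bool :=
  volume_names.contains (name ++ ".x") && volume_names.contains (name ++ ".y") &&
    volume_names.contains (name ++ ".z")

def get_vector_volumes (volumes : List String) : List String :=
  volumes.foldl (fun vector_volumes volume =>
    if is_vector_name volume then
      let name := PySem.Str.slice volume none (some (-2))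
      if !vector_volumes.contains name && all_components_exist name volumes then
        vector_volumes ++ [name]
      else vector_volumes
    else vector_volumes) []

-- ===== PORT B =====
def get_vector_volumes_alt (volumes : List String) : List String :=
  let groups : PySem.Dict String (PySem.Set String) :=
    volumes.foldl (fun groups volume =>
      if PySem.Str.endswith volume ".x" || PySem.Str.endswith volume ".y" ||
          PySem.Str.endswith volume ".z" then
        let base := PySem.Str.slice volume none (some (-2))
        let comps := (groups.getD base PySem.Set.empty).add (PySem.Str.slice volume (some (-2)) none)
        groups.insert base comps
      else groups) PySem.Dict.empty
  (groups.items.filter (fun bc =>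
      PySem.Set.issubset (PySem.Set.ofList [".x", ".y", ".z"]) bc.2)).map (·.1)

-- ===== PRECONDITION & SPEC =====
def Spec_get_vector_volumes (volumes : List String) (out : List String) : Prop := out = get_vector_volumes_alt volumes
instance (volumes : List String) (out : List String) : Decidable (Spec_get_vector_volumes volumes out) := by unfold Spec_get_vector_volumes; infer_instance

-- ===== CLAIM (what is proved, stated in full; the proofs are below) =====
def Claim_equal_get_vector_volumes : Prop := ∀ (volumes : List String), Dom_get_vector_volumes volumes → Spec_get_vector_volumes volumes (get_vector_volumes volumes)

-- ===== LEMMAS AND PROOFS =====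

-- base = v[:-2] and suffix = v[-2:]
def pvVBase (v : String) : String := PySem.Str.slice v none (some (-2))
def pvVSuf (v : String) : String := PySem.Str.slice v (some (-2)) none

-- ordered dedup with an explicit "already seen" list
def pvDedupAux (seen : List String) : List String → List String
  | [] => []
  | b :: bl => if b ∈ seen then pvDedupAux seen bl else b :: pvDedupAux (seen ++ [b]) bl

lemma pv_foldl_guard_map {α β γ : Type} (q : α → Bool) (f : α → β) (g : γ → β → γ)
    (l : List α) (acc : γ) :
    l.foldl (fun a x => if q x then g a (f x) else a) acc = ((l.filter q).map f).foldl g acc := by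
  induction l generalizing acc with
  | nil => rfl
  | cons x l ih => by_cases hx : q x = true <;> simp [hx, ih]

lemma pv_dedupAux_congr (bl : List String) : ∀ s1 s2 : List String,
    (∀ x, x ∈ s1 ↔ x ∈ s2) → pvDedupAux s1 bl = pvDedupAux s2 bl := by
  induction bl with
  | nil => intro s1 s2 h; rfl
  | cons b bl ih =>
    intro s1 s2 h
    by_cases hb : b ∈ s1
    · simp [pvDedupAux, hb, (h b).mp hb, ih s1 s2 h]
    · have hb2 : b ∉ s2 := fun hx => hb ((h b).mpr hx)
      simp only [pvDedupAux, if_neg hb, if_neg hb2]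
      refine congrArg _ (ih _ _ ?_)
      intro x; simp [h x]

lemma pv_dedupAux_seen_false (p : String → Bool) (b : String) (hb : p b = false) (bl : List String) :
    ∀ seen : List String,
      (pvDedupAux (seen ++ [b]) bl).filter p = (pvDedupAux seen bl).filter p := by
  induction bl with
  | nil => intro seen; rfl
  | cons c bl ih =>
    intro seen
    by_cases hc : c = b
    · subst hc
      by_cases hm : c ∈ seen
      · simp [pvDedupAux, hm, ih]
      · simp [pvDedupAux, hm, hb]
    · by_cases hm : c ∈ seen
      · have : c ∈ seen ++ [b] := List.mem_append_left _ hm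
        simp [pvDedupAux, hm, this, ih]
      · have hm2 : c ∉ seen ++ [b] := by
          intro hx
          rcases List.mem_append.mp hx with h1 | h1
          · exact hm h1
          · exact hc (List.mem_singleton.mp h1)
        simp only [pvDedupAux, if_neg hm, if_neg hm2, List.filter_cons]
        have hcongr : pvDedupAux (seen ++ [b] ++ [c]) bl = pvDedupAux (seen ++ [c] ++ [b]) bl := by
          refine pv_dedupAux_congr bl _ _ ?_
          intro x; simp [List.mem_append]; tauto
        rw [hcongr, ih (seen ++ [c])]

lemma pv_A_fold (p : String → Bool) (bl : List String) : ∀ acc : List String,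
    bl.foldl (fun a b => if !a.contains b && p b then a ++ [b] else a) acc
      = acc ++ (pvDedupAux acc bl).filter p := by
  induction bl with
  | nil => intro acc; simp [pvDedupAux]
  | cons b bl ih =>
    intro acc
    rw [List.foldl_cons]
    by_cases hm : b ∈ acc
    · have hc : acc.contains b = true := List.contains_iff_mem.mpr hm
      rw [show (if (!acc.contains b && p b) = true then acc ++ [b] else acc) = acc by
        rw [hc]; simp]
      rw [ih acc, pvDedupAux, if_pos hm]
    · have hc : acc.contains b = false := by simpa [List.contains_iff_mem] using hm
      by_cases hp : p b = true
      · rw [show (if (!acc.contains b && p b) = true then acc ++ [b] else acc) = acc ++ [b] by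
          rw [hc, hp]; simp]
        rw [ih (acc ++ [b]), pvDedupAux, if_neg hm, List.filter_cons, hp]
        simp
      · have hp' : p b = false := by simpa using hp
        rw [show (if (!acc.contains b && p b) = true then acc ++ [b] else acc) = acc by
          rw [hp']; simp]
        rw [ih acc, pvDedupAux, if_neg hm, List.filter_cons, hp']
        rw [pv_dedupAux_seen_false p b hp' bl acc]
        simp

lemma pv_add_fold (bl : List String) : ∀ seen : List String,
    bl.foldl PySem.Set.add seen = seen ++ pvDedupAux seen bl := by
  induction bl with
  | nil => intro seen; simp [pvDedupAux]
  | cons b bl ih =>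
    intro seen
    by_cases hm : b ∈ seen
    · have : seen.contains b = true := List.contains_iff_mem.mpr hm
      simp [List.foldl_cons, PySem.Set.add, PySem.Set.contains, pvDedupAux, hm, ih]
    · simp [List.foldl_cons, PySem.Set.add, PySem.Set.contains, pvDedupAux, hm, ih]

lemma pv_ofList_eq_dedupAux (bl : List String) : PySem.Set.ofList bl = pvDedupAux [] bl := by
  rw [PySem.Set.ofList_eq_foldl, pv_add_fold bl []]; rfl

lemma pv_B_getD (l : List (String × String)) : ∀ d : PySem.Dict String (PySem.Set String), ∀ b : String,
    (l.foldl (fun d bs => d.insert bs.1 ((d.getD bs.1 PySem.Set.empty).add bs.2)) d).getD b PySem.Set.empty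
      = PySem.Set.update (d.getD b PySem.Set.empty) ((l.filter (fun bs => bs.1 == b)).map (·.2)) := by
  induction l with
  | nil => intro d b; simp [PySem.Set.update]
  | cons kv l ih =>
    intro d b
    obtain ⟨k, v⟩ := kv
    rw [List.foldl_cons, List.filter_cons]
    by_cases hk : k = b
    · subst hk
      rw [ih]
      simp [PySem.Dict.getD_insert_self, PySem.Set.update]
    · have hbeq : ((k, v).1 == b) = false := by simpa using hk
      rw [ih, PySem.Dict.getD_insert_of_ne _ _ _ (fun h => hk h.symm)]
      simp [hbeq]

lemma pv_toList_base (v : String) : (pvVBase v).toList = v.toList.take (v.toList.length - 2) := by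
  simp only [pvVBase, PySem.Str.toList_slice, PySem.Chars.slice_eq_listSlice]
  rw [PySem.List.slice_to_neg_ofNat v.toList 2 (by omega)]

lemma pv_toList_suf (v : String) : (pvVSuf v).toList = v.toList.drop (v.toList.length - 2) := by
  simp only [pvVSuf, PySem.Str.toList_slice, PySem.Chars.slice_eq_listSlice]
  rw [PySem.List.slice_from_neg_ofNat v.toList 2 (by omega)]

lemma pv_endswith_append (b suf : String) : PySem.Str.endswith (b ++ suf) suf = true := by
  rw [PySem.Str.endswith_eq, PySem.Chars.endswith_iff, String.toList_append]
  exact List.suffix_append _ _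

lemma pv_split (v : String) : v = pvVBase v ++ pvVSuf v := by
  rw [← String.toList_inj, String.toList_append, pv_toList_base, pv_toList_suf,
    List.take_append_drop]

lemma pv_base_suf (b suf : String) (h2 : suf.toList.length = 2) :
    pvVBase (b ++ suf) = b ∧ pvVSuf (b ++ suf) = suf := by
  have hl : (b ++ suf).toList = b.toList ++ suf.toList := String.toList_append
  have hlen : (b ++ suf).toList.length - 2 = b.toList.length := by
    rw [hl, List.length_append, h2]
    omega
  constructor
  · rw [← String.toList_inj, pv_toList_base, hlen, hl, List.take_left]
  · rw [← String.toList_inj, pv_toList_suf, hlen, hl, List.drop_left]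

lemma pv_mem_comps (volumes : List String) (b suf : String) (h2 : suf.toList.length = 2)
    (hvec : is_vector_name (b ++ suf) = true) :
    (suf ∈ (((volumes.filter is_vector_name).map (fun v => (pvVBase v, pvVSuf v))).filter
        (fun bs => bs.1 == b)).map (·.2)) ↔ (b ++ suf) ∈ volumes := by
  constructor
  · intro h
    simp only [List.mem_map, List.mem_filter] at h
    obtain ⟨⟨b', s'⟩, ⟨⟨v, ⟨hv, hvec'⟩, hpair⟩, hbeq⟩, hs⟩ := h
    have hb' : pvVBase v = b' := congrArg Prod.fst hpair
    have hs' : pvVSuf v = s' := congrArg Prod.snd hpair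
    have hbb : b' = b := by simpa using hbeq
    have hss : s' = suf := by simpa using hs
    have : v = b ++ suf := by
      rw [← hbb, ← hss, ← hb', ← hs']
      exact pv_split v
    rwa [this] at hv
  · intro h
    simp only [List.mem_map, List.mem_filter]
    obtain ⟨hb, hs⟩ := pv_base_suf b suf h2
    exact ⟨(b, suf), ⟨⟨b ++ suf, ⟨h, hvec⟩, by rw [hb, hs]⟩, by simp⟩, rfl⟩

-- ===== VERDICT (by name: the statement is the Claim_ definition above) =====
theorem get_vector_volumes_spec : Claim_equal_get_vector_volumes := by
  intro volumes _
  unfold Spec_get_vector_volumes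
  show (volumes.foldl (fun a v => if is_vector_name v = true then
      (if (!a.contains (pvVBase v) && all_components_exist (pvVBase v) volumes) = true
        then a ++ [pvVBase v] else a) else a) [])
    = ((((volumes.foldl (fun d v => if is_vector_name v = true then
          d.insert (pvVBase v, pvVSuf v).1
            ((d.getD (pvVBase v, pvVSuf v).1 PySem.Set.empty).add (pvVBase v, pvVSuf v).2)
          else d) PySem.Dict.empty)).items.filter (fun bc =>
        PySem.Set.issubset (PySem.Set.ofList [".x", ".y", ".z"]) bc.2)).map (·.1))
  rw [pv_foldl_guard_map is_vector_name pvVBase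
    (fun a n => if (!a.contains n && all_components_exist n volumes) = true then a ++ [n] else a)
    volumes []]
  rw [pv_foldl_guard_map is_vector_name (fun v => (pvVBase v, pvVSuf v))
    (fun d bs => d.insert bs.1 ((d.getD bs.1 PySem.Set.empty).add bs.2))
    volumes PySem.Dict.empty]
  rw [pv_A_fold, List.nil_append]
  have hnodup : (((volumes.filter is_vector_name).map (fun v => (pvVBase v, pvVSuf v))).foldl
      (fun d bs => d.insert bs.1 ((d.getD bs.1 PySem.Set.empty).add bs.2))
      PySem.Dict.empty).keys.Nodup :=
    PySem.Dict.nodup_keys_foldl_insert_key _ (fun bs : String × String => bs.1)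
      (fun (d : PySem.Dict String (PySem.Set String)) (bs : String × String) => (d.getD bs.1 PySem.Set.empty).add bs.2) PySem.Dict.empty List.nodup_nil
  rw [PySem.Dict.items_eq_map_keys _ hnodup PySem.Set.empty]
  rw [PySem.Dict.keys_foldl_insert_key _ (fun bs : String × String => bs.1)
    (fun (d : PySem.Dict String (PySem.Set String)) (bs : String × String) => (d.getD bs.1 PySem.Set.empty).add bs.2) PySem.Dict.empty]
  rw [show (PySem.Dict.empty : PySem.Dict String (PySem.Set String)).keys = [] from rfl,
    PySem.Set.update_nil_left]
  rw [List.filter_map, List.map_map]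
  have hmapid : ∀ l : List String,
      l.map ((fun bc : String × PySem.Set String => bc.1) ∘
        (fun k => (k, (((volumes.filter is_vector_name).map (fun v => (pvVBase v, pvVSuf v))).foldl
          (fun d bs => d.insert bs.1 ((d.getD bs.1 PySem.Set.empty).add bs.2))
          PySem.Dict.empty).getD k PySem.Set.empty))) = l := by
    intro l
    rw [show ((fun bc : String × PySem.Set String => bc.1) ∘
        (fun k => (k, (((volumes.filter is_vector_name).map (fun v => (pvVBase v, pvVSuf v))).foldl
          (fun d bs => d.insert bs.1 ((d.getD bs.1 PySem.Set.empty).add bs.2))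
          PySem.Dict.empty).getD k PySem.Set.empty))) = id from funext (fun k => rfl)]
    exact List.map_id l
  rw [hmapid]
  rw [show (((volumes.filter is_vector_name).map (fun v => (pvVBase v, pvVSuf v))).map (·.1))
      = (volumes.filter is_vector_name).map pvVBase from by simp [List.map_map]]
  rw [pv_ofList_eq_dedupAux ((volumes.filter is_vector_name).map pvVBase)]
  refine (List.filter_congr ?_).symm
  intro b _
  simp only [Function.comp_apply]
  rw [Bool.eq_iff_iff]
  have hD : (((volumes.filter is_vector_name).map (fun v => (pvVBase v, pvVSuf v))).foldl
        (fun d bs => d.insert bs.1 ((d.getD bs.1 PySem.Set.empty).add bs.2))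
        PySem.Dict.empty).getD b PySem.Set.empty
      = PySem.Set.ofList (((((volumes.filter is_vector_name).map
          (fun v => (pvVBase v, pvVSuf v))).filter (fun bs => bs.1 == b)).map (·.2))) := by
    rw [pv_B_getD ((volumes.filter is_vector_name).map (fun v => (pvVBase v, pvVSuf v)))
      PySem.Dict.empty b, ← PySem.Set.update_nil_left]
    rfl
  have hsub : ∀ t : PySem.Set String,
      PySem.Set.issubset (PySem.Set.ofList [".x", ".y", ".z"]) t = true
        ↔ (".x" ∈ t ∧ ".y" ∈ t ∧ ".z" ∈ t) := by
    intro t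
    rw [PySem.Set.issubset_iff]
    constructor
    · intro h
      exact ⟨h _ (by rw [PySem.Set.mem_ofList]; simp),
        h _ (by rw [PySem.Set.mem_ofList]; simp),
        h _ (by rw [PySem.Set.mem_ofList]; simp)⟩
    · rintro ⟨h1, h2, h3⟩ x hx
      rw [PySem.Set.mem_ofList] at hx
      simp only [List.mem_cons, List.not_mem_nil, or_false] at hx
      rcases hx with rfl | rfl | rfl
      · exact h1
      · exact h2
      · exact h3
  have hx := pv_mem_comps volumes b ".x" (by decide)
    (by simp only [is_vector_name]; rw [pv_endswith_append b ".x"]; simp)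
  have hy := pv_mem_comps volumes b ".y" (by decide)
    (by simp only [is_vector_name]; rw [pv_endswith_append b ".y"]; simp)
  have hz := pv_mem_comps volumes b ".z" (by decide)
    (by simp only [is_vector_name]; rw [pv_endswith_append b ".z"]; simp)
  rw [hD, hsub]
  simp only [all_components_exist, Bool.and_eq_true, List.contains_iff_mem, PySem.Set.mem_ofList]
  exact ⟨fun ⟨h1, h2, h3⟩ => ⟨⟨hx.mp h1, hy.mp h2⟩, hz.mp h3⟩,
    fun ⟨⟨h1, h2⟩, h3⟩ => ⟨hx.mpr h1, hy.mpr h2, hz.mpr h3⟩⟩
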